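-- pv_equiv track=rewrite | github.com/CodeSancho/AI-GAMES-WITH-INFORMED-SEARCH-UNINFORMED-SEARCH-AND-A-TIC-TAC-TOE-GAME | AI Games.py | score_board
-- ===== SOURCE A (Python) =====
-- def score_board(board, player, win_n):
--
--     opponent = 'O' if player == 'X' else 'X'
--     score = 0
--     n = len(board)
--     for r in range(n):
--         for c in range(n):
--             directions = [(0,1),(1,0),(1,1),(1,-1)]
--             for dr, dc in directions:
--                 line = []
--                 for i in range(win_n):
--                     rr, cc = r + dr*i, c + dc*i
--                     if 0 <= rr < n and 0 <= cc < n: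
--                         line.append(board[rr][cc])
--                     else:
--                         break
--                 if len(line) == win_n:
--                     if opponent not in line:
--                         score += line.count(player)
--     return score
-- ===== SOURCE B (Python) =====
-- def score_board(board, player, win_n):
--     # Sliding windows via prefix counts along each maximal line, one pass per line.
--     opponent = 'O' if player == 'X' else 'X'
--     n = len(board)
--     if win_n < 1:
--         return 0
--     total = 0
--     for dr, dc in ((0, 1), (1, 0), (1, 1), (1, -1)):
--         for r in range(n):
--             for c in range(n):
--                 if 0 <= r - dr < n and 0 <= c - dc < n:
--                     continue  # (r, c) is not the head of a maximal line
--                 line = []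
--                 rr, cc = r, c
--                 while 0 <= rr < n and 0 <= cc < n:
--                     line.append(board[rr][cc])
--                     rr += dr
--                     cc += dc
--                 total += _line_score(line, player, opponent, win_n)
--     return total
--
--
-- def _line_score(line, player, opponent, k):
--     m = len(line)
--     if k > m:
--         return 0
--     p = [0]
--     o = [0]
--     for v in line:
--         p.append(p[-1] + (v == player))
--         o.append(o[-1] + (v == opponent))
--     s = 0
--     for j in range(m - k + 1):
--         if o[j + k] == o[j]:
--             s += p[j + k] - p[j]
--     return s
-- ===== Notes on version B (the rewrite author's own statement) =====
-- stated objective: faster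
-- what changed: Instead of rebuilding and rescanning a length-win_n window for every cell and direction, B walks each maximal line (row/column/diagonal) once from its head cell, builds prefix counts of player and opponent along the line, and scores every window by two prefix differences.
import Mathlib
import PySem

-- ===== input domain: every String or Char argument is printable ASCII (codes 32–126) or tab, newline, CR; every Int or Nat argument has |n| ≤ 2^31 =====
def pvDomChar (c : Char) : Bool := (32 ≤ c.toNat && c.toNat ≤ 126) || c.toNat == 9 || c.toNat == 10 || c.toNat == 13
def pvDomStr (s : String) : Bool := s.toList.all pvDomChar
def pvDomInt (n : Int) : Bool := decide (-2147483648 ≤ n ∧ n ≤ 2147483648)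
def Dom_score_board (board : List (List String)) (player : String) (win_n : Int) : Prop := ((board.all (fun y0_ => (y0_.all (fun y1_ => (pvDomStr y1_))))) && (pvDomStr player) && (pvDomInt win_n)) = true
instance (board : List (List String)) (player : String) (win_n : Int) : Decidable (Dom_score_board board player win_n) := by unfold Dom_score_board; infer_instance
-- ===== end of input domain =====

-- B replaces A's per-cell window rebuild/rescan by a single pass along each maximal line with
-- prefix counts (objective: faster; the per-window inner scan disappears).
-- Shared cell access: board[rr][cc] under the 0 <= rr,cc < n guard both programs use.
def pvInb (n r c : Int) : Bool := decide (0 ≤ r ∧ r < n ∧ 0 ≤ c ∧ c < n)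

def pvGet2 (board : List (List String)) (r c : Int) : String :=
  (PySem.List.pyGet? ((PySem.List.pyGet? board r).getD []) c).getD ""

-- ===== PORT A =====
-- the inner 'for i in range(win_n): … else: break' loop of A
def pvBuildLine (board : List (List String)) (n r c dr dc : Int) :
    List Int → List String → List String
  | [], line => line
  | i :: is, line =>
    let rr := r + dr * i
    let cc := c + dc * i
    if pvInb n rr cc then
      pvBuildLine board n r c dr dc is (line ++ [pvGet2 board rr cc])
    else line

def score_board (board : List (List String)) (player : String) (win_n : Int) : Int :=
  let opponent := if player = "X" then "O" else "X"
  let n : Int := (board.length : Int)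
  (PySem.List.pyRange 0 n 1).foldl (fun score r =>
    (PySem.List.pyRange 0 n 1).foldl (fun score c =>
      ([((0 : Int), (1 : Int)), (1, 0), (1, 1), (1, -1)]).foldl (fun score d =>
        let line := pvBuildLine board n r c d.1 d.2 (PySem.List.pyRange 0 win_n 1) []
        if (line.length : Int) = win_n then
          if opponent ∈ line then score else score + (line.count player : Int)
        else score) score) score) 0

-- ===== PORT B =====
-- the 'while 0 <= rr < n and 0 <= cc < n: line.append(...)' walk; fuel n+1 is enough for
-- every direction B uses (a maximal line has at most n cells)
def pvWalk (board : List (List String)) (n dr dc : Int) :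
    Int → Int → Nat → List String
  | _, _, 0 => []
  | rr, cc, fuel + 1 =>
    if pvInb n rr cc then
      pvGet2 board rr cc :: pvWalk board n dr dc (rr + dr) (cc + dc) fuel
    else []

-- _line_score: prefix counts p, o, then one prefix-difference test/sum per window
def pvLineScore (line : List String) (player opponent : String) (k : Int) : Int :=
  let m : Int := (line.length : Int)
  if k > m then 0
  else
    let po := line.foldl (fun (po : List Int × List Int) v =>
        (po.1 ++ [PySem.List.pyGetD po.1 (-1) 0 + (if v = player then 1 else 0)],
         po.2 ++ [PySem.List.pyGetD po.2 (-1) 0 + (if v = opponent then 1 else 0)]))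
      ([(0 : Int)], [(0 : Int)])
    (PySem.List.pyRange 0 (m - k + 1) 1).foldl (fun s j =>
      if PySem.List.pyGetD po.2 (j + k) 0 = PySem.List.pyGetD po.2 j 0 then
        s + (PySem.List.pyGetD po.1 (j + k) 0 - PySem.List.pyGetD po.1 j 0)
      else s) 0

def score_board_alt (board : List (List String)) (player : String) (win_n : Int) : Int :=
  let opponent := if player = "X" then "O" else "X"
  let n : Int := (board.length : Int)
  if win_n < 1 then 0
  else
    ([((0 : Int), (1 : Int)), (1, 0), (1, 1), (1, -1)]).foldl (fun total d =>
      (PySem.List.pyRange 0 n 1).foldl (fun total r =>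
        (PySem.List.pyRange 0 n 1).foldl (fun total c =>
          if pvInb n (r - d.1) (c - d.2) then total
          else total +
            pvLineScore (pvWalk board n d.1 d.2 r c (board.length + 1)) player opponent win_n)
          total) total) 0

-- ===== PRECONDITION & SPEC =====
-- Pre_ excludes exactly the inputs on which the Python A raises IndexError: some row shorter
-- than the board while win_n >= 1 (A then reads board[r][c] for every r, c < len(board)).
def Pre_score_board (board : List (List String)) (player : String) (win_n : Int) : Prop :=
  win_n ≤ 0 ∨ board.all (fun row => board.length ≤ row.length) = true
instance (board : List (List String)) (player : String) (win_n : Int) :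
    Decidable (Pre_score_board board player win_n) := by unfold Pre_score_board; infer_instance

def pvWitness_score_board : List (List String) × String × Int :=
  ([["X", "O", "X"], ["O", "X", " "], [" ", " ", "X"]], "X", 3)

def Spec_score_board (board : List (List String)) (player : String) (win_n : Int) (out : Int) : Prop :=
  out = score_board_alt board player win_n
instance (board : List (List String)) (player : String) (win_n : Int) (out : Int) :
    Decidable (Spec_score_board board player win_n out) := by unfold Spec_score_board; infer_instance

-- ===== CLAIM (what is proved, stated in full; the proofs are below) =====
def Claim_equal_score_board : Prop := ∀ (board : List (List String)) (player : String) (win_n : Int), Dom_score_board board player win_n → Pre_score_board board player win_n → Spec_score_board board player win_n (score_board board player win_n)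

-- ===== LEMMAS AND PROOFS =====

def pvDirOK (dr dc : Int) : Prop :=
  (dr = 0 ∧ dc = 1) ∨ (dr = 1 ∧ dc = 0) ∨ (dr = 1 ∧ dc = 1) ∨ (dr = 1 ∧ dc = -1)

def pvCells (board : List (List String)) (r c dr dc : Int) (m : Nat) : List String :=
  (List.range m).map (fun i : Nat => pvGet2 board (r + dr * (i : Int)) (c + dc * (i : Int)))

def pvL (n r c dr dc : Int) : Nat :=
  if pvInb n r c then
    min (if dr = 1 then (n - r).toNat else n.toNat + 1)
        (if dc = 1 then (n - c).toNat else if dc = -1 then (c + 1).toNat else n.toNat + 1)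
  else 0

def pvFits (n r c dr dc k : Int) : Bool :=
  decide (∀ i : Nat, i < k.toNat → pvInb n (r + dr * i) (c + dc * i) = true)

def pvG (board : List (List String)) (player opp : String) (n k r c dr dc : Int) : Int :=
  if pvFits n r c dr dc k then
    (if opp ∈ pvCells board r c dr dc k.toNat then 0
     else ((pvCells board r c dr dc k.toNat).count player : Int))
  else 0

def pvT (board : List (List String)) (player opp : String) (n k dr dc r c : Int) : Int :=
  ∑ j ∈ Finset.range (pvL n r c dr dc),
    pvG board player opp n k (r + dr * j) (c + dc * j) dr dc

def pvGrid (N : Nat) : Finset (Int × Int) :=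
  ((Finset.range N) ×ˢ (Finset.range N)).image (fun q => ((q.1 : Int), (q.2 : Int)))

lemma pvInb_iff (n r c : Int) : pvInb n r c = true ↔ (0 ≤ r ∧ r < n ∧ 0 ≤ c ∧ c < n) := by
  simp [pvInb]

lemma mem_pvGrid (N : Nat) (p : Int × Int) :
    p ∈ pvGrid N ↔ pvInb (N : Int) p.1 p.2 = true := by
  obtain ⟨a, b⟩ := p
  simp only [pvGrid, Finset.mem_image, Finset.mem_product, Finset.mem_range, pvInb_iff, Prod.mk.injEq]
  constructor
  · rintro ⟨⟨x, y⟩, ⟨hx, hy⟩, rfl, rfl⟩; omega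
  · rintro ⟨h1, h2, h3, h4⟩
    exact ⟨⟨a.toNat, b.toNat⟩, by omega, by omega, by omega⟩

lemma pvL_zero (n r c dr dc : Int) (h : ¬ pvInb n r c = true) : pvL n r c dr dc = 0 := by
  simp [pvL, h]

lemma pvL_step (n r c dr dc : Int) (hd : pvDirOK dr dc) (h : pvInb n r c = true) :
    pvL n r c dr dc = pvL n (r + dr) (c + dc) dr dc + 1 := by
  rw [pvInb_iff] at h
  rcases hd with ⟨h1, h2⟩ | ⟨h1, h2⟩ | ⟨h1, h2⟩ | ⟨h1, h2⟩ <;> subst h1 <;> subst h2 <;>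
    (simp only [pvL, pvInb_iff]; norm_num; split_ifs <;> omega)

lemma pvL_le (n r c dr dc : Int) : pvL n r c dr dc ≤ n.toNat + 1 := by
  unfold pvL; split_ifs <;> simp only [pvInb_iff] at * <;> omega

-- along a line started inside the board, cell i is on the board iff i < pvL
lemma pvInb_index_iff (n r c dr dc : Int) (hd : pvDirOK dr dc) (h : pvInb n r c = true) :
    ∀ i : Nat, (pvInb n (r + dr * i) (c + dc * i) = true ↔ i < pvL n r c dr dc) := by
  rw [pvInb_iff] at h
  rcases hd with ⟨h1, h2⟩ | ⟨h1, h2⟩ | ⟨h1, h2⟩ | ⟨h1, h2⟩ <;> subst h1 <;> subst h2 <;>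
    intro i <;>
    (simp only [pvL, pvInb_iff]; norm_num; split_ifs <;> constructor <;> intro hh <;> omega)

lemma pvCells_succ (board : List (List String)) (r c dr dc : Int) (m : Nat) :
    pvCells board r c dr dc (m + 1)
      = pvGet2 board r c :: pvCells board (r + dr) (c + dc) dr dc m := by
  unfold pvCells
  rw [List.range_succ_eq_map, List.map_cons, List.map_map]
  congr 1
  · simp
  · apply List.map_congr_left
    intro i _
    simp only [Function.comp_apply, Nat.succ_eq_add_one]
    push_cast
    ring_nf

lemma pvWalk_eq_cells (board : List (List String)) (n dr dc : Int) (hd : pvDirOK dr dc) :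
    ∀ (fuel : Nat) (r c : Int), pvL n r c dr dc ≤ fuel →
      pvWalk board n dr dc r c fuel = pvCells board r c dr dc (pvL n r c dr dc) := by
  intro fuel
  induction fuel with
  | zero =>
    intro r c h
    have : pvL n r c dr dc = 0 := by omega
    simp [pvWalk, this, pvCells]
  | succ f ih =>
    intro r c h
    by_cases hin : pvInb n r c = true
    · rw [pvL_step n r c dr dc hd hin] at h ⊢
      rw [pvCells_succ]
      simp only [pvWalk, hin, if_pos]
      rw [ih (r + dr) (c + dc) (by omega)]
    · simp [pvWalk, hin, pvL_zero n r c dr dc hin, pvCells]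

lemma pvBuildLine_eq (board : List (List String)) (n r c dr dc : Int) :
    ∀ (is : List Int) (acc : List String),
      pvBuildLine board n r c dr dc is acc
        = acc ++ ((is.takeWhile (fun i => pvInb n (r + dr * i) (c + dc * i))).map
            (fun i => pvGet2 board (r + dr * i) (c + dc * i))) := by
  intro is
  induction is with
  | nil => intro acc; simp [pvBuildLine]
  | cons i is ih =>
    intro acc
    by_cases h : pvInb n (r + dr * i) (c + dc * i) = true
    · rw [List.takeWhile_cons_of_pos (p := fun i => pvInb n (r + dr * i) (c + dc * i)) h]
      simp only [pvBuildLine, h, if_pos, List.map_cons]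
      rw [ih]
      simp
    · rw [List.takeWhile_cons_of_neg (p := fun i => pvInb n (r + dr * i) (c + dc * i)) (by simpa using h)]
      simp only [pvBuildLine, h, if_neg, List.map_nil, List.append_nil]
      simp [h]

-- A's contribution at one (r, c, direction) is pvG
lemma pvA_step (board : List (List String)) (player opp : String) (n k r c dr dc s : Int) :
    (if (((pvBuildLine board n r c dr dc (PySem.List.pyRange 0 k 1) []).length : Int) = k) then
       (if opp ∈ pvBuildLine board n r c dr dc (PySem.List.pyRange 0 k 1) [] then s
        else s + ((pvBuildLine board n r c dr dc (PySem.List.pyRange 0 k 1) []).count player : Int))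
     else s)
    = s + pvG board player opp n k r c dr dc := by
  rw [pvBuildLine_eq, List.nil_append]
  by_cases hF : pvFits n r c dr dc k = true
  · have hall : ∀ x ∈ PySem.List.pyRange 0 k 1,
        (fun i => pvInb n (r + dr * i) (c + dc * i)) x = true := by
      intro x hx
      rw [PySem.List.mem_pyRange_one] at hx
      have hx0 : x = ((x.toNat : Nat) : Int) := by omega
      have := (by simpa [pvFits] using hF : ∀ i : Nat, i < k.toNat →
        pvInb n (r + dr * i) (c + dc * i) = true) x.toNat (by omega)
      rw [hx0]; exact this
    rw [List.takeWhile_eq_self_iff.mpr hall]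
    by_cases hk : 0 ≤ k
    · have hline : (PySem.List.pyRange 0 k 1).map
          (fun i => pvGet2 board (r + dr * i) (c + dc * i)) = pvCells board r c dr dc k.toNat := by
        rw [PySem.List.pyRange_one, List.map_map]
        unfold pvCells
        rw [show (k - 0).toNat = k.toNat by omega]
        apply List.map_congr_left
        intro i _
        simp
      rw [hline]
      have hlen : ((pvCells board r c dr dc k.toNat).length : Int) = k := by
        simp [pvCells]; omega
      rw [if_pos hlen]
      unfold pvG
      rw [if_pos hF]
      split_ifs <;> ring
    · have hnil : PySem.List.pyRange 0 k 1 = [] := PySem.List.pyRange_one_eq_nil (by omega)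
      rw [hnil]
      simp only [List.map_nil, List.length_nil, Nat.cast_zero]
      rw [if_neg (by omega)]
      unfold pvG
      rw [if_pos hF]
      have : pvCells board r c dr dc k.toNat = [] := by
        have : k.toNat = 0 := by omega
        simp [pvCells, this]
      simp [this]
  · -- some cell of the window is off the board: the built line is short, A adds nothing
    have hKpos : 0 < k.toNat := by
      by_contra hh
      exact hF (by simp [pvFits]; intro i hi; omega)
    have hlt : ((PySem.List.pyRange 0 k 1).takeWhile
        (fun i => pvInb n (r + dr * i) (c + dc * i))).length < k.toNat := by
      have hle : ((PySem.List.pyRange 0 k 1).takeWhile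
          (fun i => pvInb n (r + dr * i) (c + dc * i))).length ≤ (PySem.List.pyRange 0 k 1).length :=
        (List.takeWhile_prefix _).length_le
      have hlen : (PySem.List.pyRange 0 k 1).length = k.toNat := by
        rw [PySem.List.length_pyRange_one]; omega
      rcases Nat.lt_or_ge ((((PySem.List.pyRange 0 k 1)).takeWhile
          (fun i => pvInb n (r + dr * i) (c + dc * i))).length) k.toNat with h | h
      · exact h
      · exfalso
        have heq : (PySem.List.pyRange 0 k 1).takeWhile
            (fun i => pvInb n (r + dr * i) (c + dc * i)) = PySem.List.pyRange 0 k 1 :=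
          (List.takeWhile_prefix _).eq_of_length (by omega)
        apply hF
        simp only [pvFits, decide_eq_true_eq]
        intro i hi
        have hmem : ((i : Int)) ∈ PySem.List.pyRange 0 k 1 := by
          rw [PySem.List.mem_pyRange_one]; omega
        have := List.takeWhile_eq_self_iff.mp heq _ hmem
        simpa using this
    rw [if_neg (by simp; omega)]
    unfold pvG
    rw [if_neg hF]
    ring

lemma pvListSumRange (m : Nat) (f : Nat → Int) :
    ((List.range m).map f).sum = ∑ i ∈ Finset.range m, f i := by
  induction m with
  | zero => simp
  | succ m ih => rw [List.range_succ, Finset.sum_range_succ, List.map_append]; simp [ih]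

lemma pvFold_eq (player opp : String) (line : List String) :
    ∀ (P O : List Int) (a b : Int), P.getLast? = some a → O.getLast? = some b →
      line.foldl (fun (po : List Int × List Int) v =>
          (po.1 ++ [PySem.List.pyGetD po.1 (-1) 0 + (if v = player then 1 else 0)],
           po.2 ++ [PySem.List.pyGetD po.2 (-1) 0 + (if v = opp then 1 else 0)])) (P, O)
      = (P ++ (List.range line.length).map
            (fun j : Nat => a + (((line.take (j + 1)).count player : Nat) : Int)),
         O ++ (List.range line.length).map
            (fun j : Nat => b + (((line.take (j + 1)).count opp : Nat) : Int))) := by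
  induction line with
  | nil => intro P O a b _ _; simp
  | cons v rest ih =>
    intro P O a b ha hb
    have hPne : P ≠ [] := by intro h; rw [h] at ha; simp at ha
    have hOne : O ≠ [] := by intro h; rw [h] at hb; simp at hb
    rw [List.foldl_cons]
    rw [PySem.List.pyGetD_neg_one (h := hPne), PySem.List.pyGetD_neg_one (h := hOne)]
    have hav : P.getLast hPne = a := by
      have := List.getLast?_eq_getLast (l := P) hPne; rw [this] at ha; exact Option.some_injective _ ha
    have hbv : O.getLast hOne = b := by
      have := List.getLast?_eq_getLast (l := O) hOne; rw [this] at hb; exact Option.some_injective _ hb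
    rw [hav, hbv]
    rw [ih (P ++ [a + (if v = player then 1 else 0)]) (O ++ [b + (if v = opp then 1 else 0)])
        (a + (if v = player then 1 else 0)) (b + (if v = opp then 1 else 0))
        (by simp) (by simp)]
    rw [Prod.mk.injEq]
    refine ⟨?_, ?_⟩
    ·
      rw [List.append_assoc]
      congr 1
      rw [List.length_cons, List.range_succ_eq_map, List.map_cons, List.map_map]
      simp only [List.singleton_append]
      congr 1
      · simp [List.count_cons]
      · apply List.map_congr_left
        intro j _
        simp only [Function.comp_apply, List.take_succ_cons, List.count_cons]
        split_ifs <;> simp_all <;> push_cast <;> ring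
    ·
      rw [List.append_assoc]
      congr 1
      rw [List.length_cons, List.range_succ_eq_map, List.map_cons, List.map_map]
      simp only [List.singleton_append]
      congr 1
      · simp [List.count_cons]
      · apply List.map_congr_left
        intro j _
        simp only [Function.comp_apply, List.take_succ_cons, List.count_cons]
        split_ifs <;> simp_all <;> push_cast <;> ring

lemma pvPrefix_closed (s : String) (line : List String) (len : Nat) (h : line.length = len) :
    (0 : Int) :: (List.range len).map
        (fun j : Nat => (0 : Int) + (((line.take (j + 1)).count s : Nat) : Int))
      = (List.range (len + 1)).map
        (fun j : Nat => (((line.take j).count s : Nat) : Int)) := by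
  subst h
  rw [List.range_succ_eq_map, List.map_cons, List.map_map]
  simp

lemma pvPrefix_getD (f : Nat → Int) (len j : Nat) (hj : j ≤ len) :
    PySem.List.pyGetD ((List.range (len + 1)).map f) ((j : Nat) : Int) 0 = f j := by
  rw [PySem.List.pyGetD_natCast]
  rw [List.getD_eq_getElem?_getD]
  simp [List.getElem?_map, List.getElem?_range (by omega : j < len + 1)]

lemma pvWindow_eq (board : List (List String)) (r c dr dc : Int) (m j K : Nat) (h : j + K ≤ m) :
    ((pvCells board r c dr dc m).drop j).take K
      = pvCells board (r + dr * j) (c + dc * j) dr dc K := by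
  apply List.ext_getElem
  · simp [pvCells]; omega
  · intro i h1 h2
    simp only [pvCells, List.getElem_take, List.getElem_drop, List.getElem_map, List.getElem_range]
    congr 1 <;> push_cast <;> ring

lemma pvFits_offset (n r c dr dc k : Int) (j : Nat) (hd : pvDirOK dr dc)
    (hin : pvInb n r c = true) (hk : 1 ≤ k) :
    pvFits n (r + dr * j) (c + dc * j) dr dc k = true ↔ j + k.toNat ≤ pvL n r c dr dc := by
  simp only [pvFits, decide_eq_true_eq]
  have key : ∀ i : Nat, (r + dr * j + dr * i) = r + dr * ((j + i : Nat) : Int)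
      ∧ (c + dc * j + dc * i) = c + dc * ((j + i : Nat) : Int) := by
    intro i; constructor <;> push_cast <;> ring
  constructor
  · intro h
    have := h (k.toNat - 1) (by omega)
    rw [(key (k.toNat - 1)).1, (key (k.toNat - 1)).2] at this
    have := (pvInb_index_iff n r c dr dc hd hin (j + (k.toNat - 1))).mp this
    omega
  · intro h i hi
    rw [(key i).1, (key i).2]
    exact (pvInb_index_iff n r c dr dc hd hin (j + i)).mpr (by omega)

lemma pvSumPyRange (t : Int) (g : Int → Int) :
    ((PySem.List.pyRange 0 t 1).map g).sum = ∑ i ∈ Finset.range t.toNat, g ((i : Nat) : Int) := by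
  rw [PySem.List.pyRange_one, List.map_map, show (t - 0).toNat = t.toNat by omega,
    ← pvListSumRange]
  congr 1
  apply List.map_congr_left
  intro i _
  simp

lemma pvG_zero_of_far (board : List (List String)) (player opp : String) (n k r c dr dc : Int)
    (j : Nat) (hd : pvDirOK dr dc) (hin : pvInb n r c = true) (hk : 1 ≤ k)
    (hfar : ¬ (j + k.toNat ≤ pvL n r c dr dc)) :
    pvG board player opp n k (r + dr * j) (c + dc * j) dr dc = 0 := by
  unfold pvG
  rw [if_neg]
  intro h
  exact hfar ((pvFits_offset n r c dr dc k j hd hin hk).mp h)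

lemma pvLineScore_eq (board : List (List String)) (player opp : String) (n k dr dc r c : Int)
    (hd : pvDirOK dr dc) (hk : 1 ≤ k) (hin : pvInb n r c = true) :
    pvLineScore (pvCells board r c dr dc (pvL n r c dr dc)) player opp k
      = pvT board player opp n k dr dc r c := by
  have hKk : ((k.toNat : Nat) : Int) = k := by omega
  set L := pvL n r c dr dc with hLdef
  set K := k.toNat with hKdef
  have hlen : (pvCells board r c dr dc L).length = L := by simp [pvCells]
  by_cases hkL : k > (L : Int)
  · have hz : pvT board player opp n k dr dc r c = 0 := by
      apply Finset.sum_eq_zero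
      intro j hj
      exact pvG_zero_of_far board player opp n k r c dr dc j hd hin hk (by
        rw [Finset.mem_range] at hj; omega)
    rw [hz]
    simp only [pvLineScore, hlen]
    rw [if_pos hkL]
  · simp only [pvLineScore, hlen]
    rw [if_neg hkL]
    rw [pvFold_eq player opp _ [0] [0] 0 0 (by simp) (by simp)]
    simp only [List.singleton_append, hlen]
    rw [pvPrefix_closed player _ L hlen, pvPrefix_closed opp _ L hlen]
    rw [show (fun (s : Int) (j : Int) =>
        if PySem.List.pyGetD ((List.range (L + 1)).map
              (fun j : Nat => ((((pvCells board r c dr dc L).take j).count opp : Nat) : Int))) (j + k) 0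
            = PySem.List.pyGetD ((List.range (L + 1)).map
              (fun j : Nat => ((((pvCells board r c dr dc L).take j).count opp : Nat) : Int))) j 0 then
          s + (PySem.List.pyGetD ((List.range (L + 1)).map
              (fun j : Nat => ((((pvCells board r c dr dc L).take j).count player : Nat) : Int))) (j + k) 0
            - PySem.List.pyGetD ((List.range (L + 1)).map
              (fun j : Nat => ((((pvCells board r c dr dc L).take j).count player : Nat) : Int))) j 0)
        else s)
      = (fun (s : Int) (j : Int) => s +
          (if PySem.List.pyGetD ((List.range (L + 1)).map
              (fun j : Nat => ((((pvCells board r c dr dc L).take j).count opp : Nat) : Int))) (j + k) 0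
            = PySem.List.pyGetD ((List.range (L + 1)).map
              (fun j : Nat => ((((pvCells board r c dr dc L).take j).count opp : Nat) : Int))) j 0 then
          (PySem.List.pyGetD ((List.range (L + 1)).map
              (fun j : Nat => ((((pvCells board r c dr dc L).take j).count player : Nat) : Int))) (j + k) 0
            - PySem.List.pyGetD ((List.range (L + 1)).map
              (fun j : Nat => ((((pvCells board r c dr dc L).take j).count player : Nat) : Int))) j 0)
          else 0)) from by
        funext s j; split_ifs <;> ring]
    rw [PySem.List.foldl_add]
    rw [pvSumPyRange]
    rw [zero_add]
    have htoNat : ((L : Int) - k + 1).toNat = L - K + 1 := by omega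
    rw [htoNat]
    unfold pvT
    rw [← Finset.sum_subset (by
        intro x hx
        rw [Finset.mem_range] at *
        omega : Finset.range (L - K + 1) ⊆ Finset.range L)
      (by
        intro j _ hj2
        rw [Finset.mem_range] at hj2
        exact pvG_zero_of_far board player opp n k r c dr dc j hd hin hk (by omega))]
    apply Finset.sum_congr rfl
    intro j hj
    rw [Finset.mem_range] at hj
    have hjK : j + K ≤ L := by omega
    have hcast : ((j : Nat) : Int) + k = (((j + K : Nat)) : Int) := by push_cast; omega
    rw [hcast]
    rw [pvPrefix_getD _ L (j + K) (by omega), pvPrefix_getD _ L (j + K) (by omega),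
      pvPrefix_getD _ L j (by omega), pvPrefix_getD _ L j (by omega)]
    have htake : (pvCells board r c dr dc L).take (j + K)
        = (pvCells board r c dr dc L).take j ++ pvCells board (r + dr * j) (c + dc * j) dr dc K := by
      rw [← pvWindow_eq board r c dr dc L j K hjK]
      rw [← List.take_add]
    rw [htake]
    rw [List.count_append, List.count_append]
    unfold pvG
    rw [if_pos ((pvFits_offset n r c dr dc k j hd hin hk).mpr (by omega))]
    rw [← hKdef]
    by_cases hop : opp ∈ pvCells board (r + dr * j) (c + dc * j) dr dc K
    · rw [if_neg, if_pos hop]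
      · have : (pvCells board (r + dr * j) (c + dc * j) dr dc K).count opp ≠ 0 := by
          rw [Ne, List.count_eq_zero]
          exact fun hcon => hcon hop
        intro hcon
        push_cast at hcon
        omega
    · rw [if_pos, if_neg hop]
      · push_cast
        ring
      · have : (pvCells board (r + dr * j) (c + dc * j) dr dc K).count opp = 0 :=
          List.count_eq_zero.mpr hop
        rw [this]
        push_cast
        ring

lemma pvT_zero (board : List (List String)) (player opp : String) (n k dr dc r c : Int)
    (h : ¬ pvInb n r c = true) : pvT board player opp n k dr dc r c = 0 := by
  unfold pvT
  rw [pvL_zero n r c dr dc h]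
  simp

lemma pvT_step (board : List (List String)) (player opp : String) (n k dr dc r c : Int)
    (hd : pvDirOK dr dc) (h : pvInb n r c = true) :
    pvT board player opp n k dr dc r c
      = pvG board player opp n k r c dr dc + pvT board player opp n k dr dc (r + dr) (c + dc) := by
  unfold pvT
  rw [pvL_step n r c dr dc hd h]
  rw [Finset.sum_range_succ']
  have h0 : pvG board player opp n k (r + dr * ((0 : Nat) : Int)) (c + dc * ((0 : Nat) : Int)) dr dc
      = pvG board player opp n k r c dr dc := by norm_num
  have hsh : ∀ j : Nat,
      pvG board player opp n k (r + dr * (((j + 1 : Nat)) : Int)) (c + dc * (((j + 1 : Nat)) : Int)) dr dc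
        = pvG board player opp n k ((r + dr) + dr * j) ((c + dc) + dc * j) dr dc := by
    intro j
    congr 1 <;> push_cast <;> ring
  rw [h0, Finset.sum_congr rfl (fun j _ => hsh j)]
  ring

lemma pvReindex (board : List (List String)) (player opp : String) (N : Nat) (k dr dc : Int)
    (hd : pvDirOK dr dc) :
    ∑ p ∈ pvGrid N, (if pvInb (N : Int) (p.1 - dr) (p.2 - dc) then 0
        else pvT board player opp (N : Int) k dr dc p.1 p.2)
      = ∑ p ∈ pvGrid N, pvG board player opp (N : Int) k p.1 p.2 dr dc := by
  have hnext_inj : Function.Injective (fun p : Int × Int => (p.1 + dr, p.2 + dc)) := by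
    intro p q h
    rw [Prod.mk.injEq] at h
    exact Prod.ext (by omega) (by omega)
  have himg : ∀ p : Int × Int,
      (p ∈ (pvGrid N).image (fun p : Int × Int => (p.1 + dr, p.2 + dc))
        ↔ pvInb (N : Int) (p.1 - dr) (p.2 - dc) = true) := by
    intro p
    rw [Finset.mem_image]
    constructor
    · rintro ⟨q, hq, rfl⟩
      simpa using (mem_pvGrid N q).mp hq
    · intro h
      refine ⟨(p.1 - dr, p.2 - dc), (mem_pvGrid N _).mpr h, ?_⟩
      simp
  -- RHS: each pvG at p ∈ grid is T p - T (next p), and the sums telescope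
  have hstep : ∀ p ∈ pvGrid N, pvG board player opp (N : Int) k p.1 p.2 dr dc
      = pvT board player opp (N : Int) k dr dc p.1 p.2
        - pvT board player opp (N : Int) k dr dc (p.1 + dr) (p.2 + dc) := by
    intro p hp
    rw [pvT_step board player opp (N : Int) k dr dc p.1 p.2 hd ((mem_pvGrid N p).mp hp)]
    ring
  rw [Finset.sum_congr rfl hstep]
  rw [Finset.sum_sub_distrib]
  have himage_sum : ∑ p ∈ pvGrid N,
      pvT board player opp (N : Int) k dr dc (p.1 + dr) (p.2 + dc)
      = ∑ p ∈ (pvGrid N).image (fun p : Int × Int => (p.1 + dr, p.2 + dc)),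
          pvT board player opp (N : Int) k dr dc p.1 p.2 := by
    rw [Finset.sum_image (fun p _ q _ h => hnext_inj h)]
  rw [himage_sum]
  set S := pvGrid N
  set Tn := (S.image (fun p : Int × Int => (p.1 + dr, p.2 + dc)))
  have hTzero : ∀ p ∈ Tn, p ∉ S → pvT board player opp (N : Int) k dr dc p.1 p.2 = 0 := by
    intro p _ hpS
    exact pvT_zero _ _ _ _ _ _ _ _ _ (by
      intro hcon
      exact hpS ((mem_pvGrid N p).mpr hcon))
  -- ∑_S T - ∑_Tn T = ∑_{S \ Tn} T
  have hsplitS : ∑ p ∈ S, pvT board player opp (N : Int) k dr dc p.1 p.2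
      = ∑ p ∈ S ∩ Tn, pvT board player opp (N : Int) k dr dc p.1 p.2
        + ∑ p ∈ S \ Tn, pvT board player opp (N : Int) k dr dc p.1 p.2 :=
    (Finset.sum_inter_add_sum_diff S Tn _).symm
  have hsplitT : ∑ p ∈ Tn, pvT board player opp (N : Int) k dr dc p.1 p.2
      = ∑ p ∈ S ∩ Tn, pvT board player opp (N : Int) k dr dc p.1 p.2 := by
    rw [Finset.inter_comm]
    apply (Finset.sum_subset (Finset.inter_subset_left) ?_).symm
    intro x hx hx2
    exact hTzero x hx (by
      intro hcon
      exact hx2 (Finset.mem_inter.mpr ⟨hx, hcon⟩))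
  rw [hsplitS, hsplitT]
  have hfilter : S \ Tn = S.filter (fun p => ¬ pvInb (N : Int) (p.1 - dr) (p.2 - dc) = true) := by
    ext p
    simp only [Finset.mem_sdiff, Finset.mem_filter]
    rw [himg p]
  have : ∑ p ∈ S \ Tn, pvT board player opp (N : Int) k dr dc p.1 p.2
      = ∑ p ∈ S, (if pvInb (N : Int) (p.1 - dr) (p.2 - dc) then 0
          else pvT board player opp (N : Int) k dr dc p.1 p.2) := by
    rw [hfilter]
    rw [Finset.sum_filter]
    apply Finset.sum_congr rfl
    intro p _
    split_ifs <;> simp_all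
  rw [this]
  ring

def pvOpp (player : String) : String := if player = "X" then "O" else "X"

lemma pvG_zero_of_nonpos (board : List (List String)) (player opp : String) (n k r c dr dc : Int)
    (hk : k < 1) : pvG board player opp n k r c dr dc = 0 := by
  unfold pvG
  have : k.toNat = 0 := by omega
  rw [this]
  simp [pvCells]

lemma pvGridSum (N : Nat) (h : Int → Int → Int) :
    ∑ p ∈ pvGrid N, h p.1 p.2 = ∑ r ∈ Finset.range N, ∑ c ∈ Finset.range N, h (r : Int) (c : Int) := by
  unfold pvGrid
  rw [Finset.sum_image (by
    intro p _ q _ hpq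
    rw [Prod.mk.injEq] at hpq
    exact Prod.ext (by omega) (by omega))]
  rw [← Finset.sum_product']

lemma pvA_sum (board : List (List String)) (player : String) (k : Int) :
    score_board board player k
      = ∑ p ∈ pvGrid board.length,
          (pvG board player (pvOpp player) (board.length : Int) k p.1 p.2 0 1
           + pvG board player (pvOpp player) (board.length : Int) k p.1 p.2 1 0
           + pvG board player (pvOpp player) (board.length : Int) k p.1 p.2 1 1
           + pvG board player (pvOpp player) (board.length : Int) k p.1 p.2 1 (-1)) := by
  unfold score_board pvOpp
  simp only [List.foldl_cons, List.foldl_nil, pvA_step]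
  rw [show (fun (score r : Int) =>
      (PySem.List.pyRange 0 (board.length : Int) 1).foldl (fun score c =>
        score + pvG board player (if player = "X" then "O" else "X") (board.length : Int) k r c 0 1
          + pvG board player (if player = "X" then "O" else "X") (board.length : Int) k r c 1 0
          + pvG board player (if player = "X" then "O" else "X") (board.length : Int) k r c 1 1
          + pvG board player (if player = "X" then "O" else "X") (board.length : Int) k r c 1 (-1)) score)
    = (fun (score r : Int) =>
      (PySem.List.pyRange 0 (board.length : Int) 1).foldl (fun score c =>
        score + (pvG board player (if player = "X" then "O" else "X") (board.length : Int) k r c 0 1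
          + pvG board player (if player = "X" then "O" else "X") (board.length : Int) k r c 1 0
          + pvG board player (if player = "X" then "O" else "X") (board.length : Int) k r c 1 1
          + pvG board player (if player = "X" then "O" else "X") (board.length : Int) k r c 1 (-1))) score)
    from by
      funext score r
      congr 1
      funext s c
      ring]
  simp only [PySem.List.foldl_add]
  rw [zero_add, pvSumPyRange, Int.toNat_natCast]
  rw [pvGridSum board.length (fun r c =>
      pvG board player (if player = "X" then "O" else "X") (board.length : Int) k r c 0 1
      + pvG board player (if player = "X" then "O" else "X") (board.length : Int) k r c 1 0
      + pvG board player (if player = "X" then "O" else "X") (board.length : Int) k r c 1 1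
      + pvG board player (if player = "X" then "O" else "X") (board.length : Int) k r c 1 (-1))]
  apply Finset.sum_congr rfl
  intro r _
  rw [pvSumPyRange, Int.toNat_natCast]

lemma pvDoubleSum (N : Nat) (h : Int → Int → Int) :
    ((PySem.List.pyRange 0 (N : Int) 1).map (fun r =>
        ((PySem.List.pyRange 0 (N : Int) 1).map (fun c => h r c)).sum)).sum
      = ∑ p ∈ pvGrid N, h p.1 p.2 := by
  rw [pvSumPyRange, Int.toNat_natCast, pvGridSum N h]
  apply Finset.sum_congr rfl
  intro r _
  rw [pvSumPyRange, Int.toNat_natCast]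

lemma pvIteAdd (n dr dc r : Int) (LS : Int → Int) :
    (fun (total c : Int) => if pvInb n (r - dr) (c - dc) then total else total + LS c)
      = fun (total c : Int) => total + (if pvInb n (r - dr) (c - dc) then 0 else LS c) := by
  funext t c
  split_ifs <;> ring

lemma pvDir_sum (board : List (List String)) (player : String) (k dr dc : Int)
    (hd : pvDirOK dr dc) (hk : 1 ≤ k) :
    ∑ p ∈ pvGrid board.length,
        (if pvInb (board.length : Int) (p.1 - dr) (p.2 - dc) then 0
         else pvLineScore (pvWalk board (board.length : Int) dr dc p.1 p.2 (board.length + 1))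
            player (pvOpp player) k)
      = ∑ p ∈ pvGrid board.length,
          pvG board player (pvOpp player) (board.length : Int) k p.1 p.2 dr dc := by
  rw [← pvReindex board player (pvOpp player) board.length k dr dc hd]
  apply Finset.sum_congr rfl
  intro p hp
  by_cases hpred : pvInb (board.length : Int) (p.1 - dr) (p.2 - dc) = true
  · rw [if_pos hpred, if_pos hpred]
  · rw [if_neg hpred, if_neg hpred]
    have hin : pvInb (board.length : Int) p.1 p.2 = true := (mem_pvGrid board.length p).mp hp
    rw [pvWalk_eq_cells board (board.length : Int) dr dc hd (board.length + 1) p.1 p.2 (by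
      have := pvL_le (board.length : Int) p.1 p.2 dr dc
      omega)]
    exact pvLineScore_eq board player (pvOpp player) (board.length : Int) k dr dc p.1 p.2 hd hk hin

lemma pvB_sum (board : List (List String)) (player : String) (k : Int) (hk : 1 ≤ k) :
    score_board_alt board player k
      = ∑ p ∈ pvGrid board.length,
          (pvG board player (pvOpp player) (board.length : Int) k p.1 p.2 0 1
           + pvG board player (pvOpp player) (board.length : Int) k p.1 p.2 1 0
           + pvG board player (pvOpp player) (board.length : Int) k p.1 p.2 1 1
           + pvG board player (pvOpp player) (board.length : Int) k p.1 p.2 1 (-1)) := by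
  unfold score_board_alt
  rw [if_neg (by omega : ¬ k < 1)]
  simp only [List.foldl_cons, List.foldl_nil, pvIteAdd, PySem.List.foldl_add]
  rw [Finset.sum_add_distrib, Finset.sum_add_distrib, Finset.sum_add_distrib]
  rw [← pvDir_sum board player k 0 1 (by unfold pvDirOK; tauto) hk,
    ← pvDir_sum board player k 1 0 (by unfold pvDirOK; tauto) hk,
    ← pvDir_sum board player k 1 1 (by unfold pvDirOK; tauto) hk,
    ← pvDir_sum board player k 1 (-1) (by unfold pvDirOK; tauto) hk]
  unfold pvOpp
  rw [pvDoubleSum board.length (fun r c =>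
      if pvInb (board.length : Int) (r - 0) (c - 1) then 0
      else pvLineScore (pvWalk board (board.length : Int) 0 1 r c (board.length + 1)) player
        (if player = "X" then "O" else "X") k),
    pvDoubleSum board.length (fun r c =>
      if pvInb (board.length : Int) (r - 1) (c - 0) then 0
      else pvLineScore (pvWalk board (board.length : Int) 1 0 r c (board.length + 1)) player
        (if player = "X" then "O" else "X") k),
    pvDoubleSum board.length (fun r c =>
      if pvInb (board.length : Int) (r - 1) (c - 1) then 0
      else pvLineScore (pvWalk board (board.length : Int) 1 1 r c (board.length + 1)) player
        (if player = "X" then "O" else "X") k),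
    pvDoubleSum board.length (fun r c =>
      if pvInb (board.length : Int) (r - 1) (c - -1) then 0
      else pvLineScore (pvWalk board (board.length : Int) 1 (-1) r c (board.length + 1)) player
        (if player = "X" then "O" else "X") k)]
  rw [zero_add]

-- ===== VERDICT (by name: the statement is the Claim_ definition above) =====
theorem score_board_spec : Claim_equal_score_board := by
  intro board player win_n _ _
  unfold Spec_score_board
  by_cases hk : 1 ≤ win_n
  · rw [pvA_sum, pvB_sum board player win_n hk]
  · rw [pvA_sum]
    simp only [score_board_alt]
    rw [if_pos (by omega : win_n < 1)]
    apply Finset.sum_eq_zero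
    intro p _
    rw [pvG_zero_of_nonpos _ _ _ _ _ _ _ _ _ (by omega),
      pvG_zero_of_nonpos _ _ _ _ _ _ _ _ _ (by omega),
      pvG_zero_of_nonpos _ _ _ _ _ _ _ _ _ (by omega),
      pvG_zero_of_nonpos _ _ _ _ _ _ _ _ _ (by omega)]
    ring
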